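-- pv_equiv track=rewrite | github.com/TheWorldAvatar/mcp-tool-layer | evaluation/development_check/number_of_steps.py | _score_ordered_maps
-- ===== SOURCE A (Python) =====
-- from typing import Dict, List, Optional, Tuple, Any
--
-- def _score_ordered_maps(gt_map: Dict[str, List[str]], pred_map: Dict[str, List[str]]) -> Tuple[int, int, int]:
--     tp = fp = fn = 0
--     keys = set(gt_map.keys()) | set(pred_map.keys())
--     for k in keys:
--         g = gt_map.get(k, [])
--         p = pred_map.get(k, [])
--         n = min(len(g), len(p))
--         eq = sum(1 for i in range(n) if g[i] == p[i])
--         tp += eq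
--         fp += (len(p) - eq)
--         fn += (len(g) - eq)
--     return tp, fp, fn
-- ===== SOURCE B (Python) =====
-- def _score_ordered_maps(gt_map, pred_map):
--     # Represent each map as a set of positioned triples (key, position, value);
--     # a true positive is exactly a triple present in both sets, so the three
--     # counts are pure set algebra: |G&P|, |P|-|G&P|, |G|-|G&P|.
--     G = {(k, i, v) for k, vs in gt_map.items() for i, v in enumerate(vs)}
--     P = {(k, i, v) for k, vs in pred_map.items() for i, v in enumerate(vs)}
--     tp = len(G & P)
--     return tp, len(P) - tp, len(G) - tp
-- ===== Notes on version B (the rewrite author's own statement) =====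
-- stated objective: alternative
-- what changed: B replaces A's per-key loop with three running counters by a set-algebra formulation: each map is flattened into a set of (key, position, value) triples, tp is the cardinality of the intersection of the two triple sets, and fp/fn are the set-size differences.
import Mathlib
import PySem

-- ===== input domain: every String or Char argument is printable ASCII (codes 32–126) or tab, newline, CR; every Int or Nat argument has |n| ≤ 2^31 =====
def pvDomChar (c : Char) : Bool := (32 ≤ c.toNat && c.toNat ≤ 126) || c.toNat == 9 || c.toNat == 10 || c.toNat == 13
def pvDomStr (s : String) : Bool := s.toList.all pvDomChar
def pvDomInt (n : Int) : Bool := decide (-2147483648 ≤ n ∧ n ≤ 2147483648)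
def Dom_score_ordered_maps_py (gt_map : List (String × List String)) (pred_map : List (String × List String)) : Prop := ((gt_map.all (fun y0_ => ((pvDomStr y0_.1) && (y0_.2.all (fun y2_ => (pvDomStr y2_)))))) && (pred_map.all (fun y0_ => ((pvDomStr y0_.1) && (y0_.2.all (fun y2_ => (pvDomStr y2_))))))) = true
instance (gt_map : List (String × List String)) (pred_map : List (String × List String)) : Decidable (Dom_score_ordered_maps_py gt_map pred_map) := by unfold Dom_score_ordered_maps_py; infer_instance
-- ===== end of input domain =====

-- B recasts the task as set algebra: each map is flattened into a set of (key, position, value)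
-- triples, tp = |G ∩ P|, fp = |P| − tp, fn = |G| − tp; objective: alternative formulation.

-- ===== PORT A =====
def score_ordered_maps_py (gt_map : List (String × List String)) (pred_map : List (String × List String)) : Int × Int × Int :=
  -- keys = set(gt_map.keys()) | set(pred_map.keys()); the loop only feeds commutative sums, so
  -- Python's hash iteration order cannot affect the result.
  let keys : PySem.Set String :=
    PySem.Set.union (PySem.Set.ofList (gt_map.map (·.1))) (pred_map.map (·.1))
  keys.foldl (fun acc k =>
    let g := (PySem.Dict.mk gt_map).getD k []
    let p := (PySem.Dict.mk pred_map).getD k []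
    let n : Int := min (g.length : Int) (p.length : Int)
    let eq : Int := ((PySem.List.pyRange 0 n 1).map (fun i =>
      if PySem.List.pyGetD g i "" = PySem.List.pyGetD p i "" then (1 : Int) else 0)).sum
    (acc.1 + eq, acc.2.1 + ((p.length : Int) - eq), acc.2.2 + ((g.length : Int) - eq)))
    (0, 0, 0)

-- ===== PORT B =====
-- the set comprehension {(k, i, v) for k, vs in m.items() for i, v in enumerate(vs)}
def pvTriples (m : List (String × List String)) : List (String × Int × String) :=
  m.flatMap (fun kv => (PySem.List.enumerate kv.2 0).map (fun iv => (kv.1, iv.1, iv.2)))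

def score_ordered_maps_py_alt (gt_map : List (String × List String)) (pred_map : List (String × List String)) : Int × Int × Int :=
  let G : PySem.Set (String × Int × String) := PySem.Set.ofList (pvTriples gt_map)
  let P : PySem.Set (String × Int × String) := PySem.Set.ofList (pvTriples pred_map)
  let tp : Int := ((PySem.Set.inter G P).length : Int)
  (tp, (P.length : Int) - tp, (G.length : Int) - tp)

-- ===== PRECONDITION & SPEC =====
-- Pre_ excludes association lists with duplicate keys: both parameters are dicts in Python, and a
-- Python dict never has duplicate keys, so such lists represent no input A ever sees.
def Pre_score_ordered_maps_py (gt_map : List (String × List String)) (pred_map : List (String × List String)) : Prop :=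
  (gt_map.map (·.1)).Nodup ∧ (pred_map.map (·.1)).Nodup
instance (gt_map : List (String × List String)) (pred_map : List (String × List String)) : Decidable (Pre_score_ordered_maps_py gt_map pred_map) := by unfold Pre_score_ordered_maps_py; infer_instance

def pvWitness_score_ordered_maps_py : (List (String × List String)) × (List (String × List String)) :=
  ([("a", ["x", "y"])], [("a", ["x", "z"]), ("b", ["q"])])

def Spec_score_ordered_maps_py (gt_map : List (String × List String)) (pred_map : List (String × List String)) (out : Int × Int × Int) : Prop := out = score_ordered_maps_py_alt gt_map pred_map
instance (gt_map : List (String × List String)) (pred_map : List (String × List String)) (out : Int × Int × Int) : Decidable (Spec_score_ordered_maps_py gt_map pred_map out) := by unfold Spec_score_ordered_maps_py; infer_instance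

-- ===== CLAIM (what is proved, stated in full; the proofs are below) =====
def Claim_equal_score_ordered_maps_py : Prop := ∀ (gt_map : List (String × List String)) (pred_map : List (String × List String)), Dom_score_ordered_maps_py gt_map pred_map → Pre_score_ordered_maps_py gt_map pred_map → Spec_score_ordered_maps_py gt_map pred_map (score_ordered_maps_py gt_map pred_map)

-- ===== LEMMAS AND PROOFS =====

-- the common positional match count both sides reduce to
def pvCnt (g p : List String) : Nat :=
  ((List.range (min g.length p.length)).filter (fun i => decide (g.getD i "" = p.getD i ""))).length

-- a sum of 0/1 indicators is the length of the filtered list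
lemma pv_sum_ite_count (q : Nat → Prop) [DecidablePred q] :
    ∀ (l : List Nat), (l.map (fun i => if q i then (1 : Int) else 0)).sum
      = ((l.filter (fun i => decide (q i))).length : Int) := by
  intro l
  induction l with
  | nil => simp
  | cons a t ih =>
    by_cases h : q a
    · simp [h, ih]; ring
    · simp [h, ih]

-- A's inner counting loop at one key equals pvCnt
lemma pv_inner (g p : List String) :
    ((PySem.List.pyRange 0 (min (g.length : Int) (p.length : Int)) 1).map (fun i =>
      if PySem.List.pyGetD g i "" = PySem.List.pyGetD p i "" then (1 : Int) else 0)).sum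
    = (pvCnt g p : Int) := by
  have hcast : min (g.length : Int) (p.length : Int) = ((min g.length p.length : Nat) : Int) := by
    exact_mod_cast rfl
  rw [hcast, PySem.List.pyRange_zero_nat, List.map_map]
  have hmap : (List.range (min g.length p.length)).map
      ((fun i => if PySem.List.pyGetD g i "" = PySem.List.pyGetD p i "" then (1 : Int) else 0) ∘ (fun k : Nat => (k : Int)))
      = (List.range (min g.length p.length)).map
        (fun i => if g.getD i "" = p.getD i "" then (1 : Int) else 0) := by
    apply List.map_congr_left
    intro i _
    simp [Function.comp, PySem.List.pyGetD_natCast]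
  rw [hmap, pv_sum_ite_count (fun i => g.getD i "" = p.getD i "")]
  rfl

-- fold of a triple of sums
lemma pv_foldl_triple (K : List String) (f1 f2 f3 : String → Int) :
    ∀ (a b c : Int),
    K.foldl (fun acc k => (acc.1 + f1 k, acc.2.1 + f2 k, acc.2.2 + f3 k)) (a, b, c)
      = (a + (K.map f1).sum, b + (K.map f2).sum, c + (K.map f3).sum) := by
  induction K with
  | nil => intro a b c; simp
  | cons k K ih =>
    intro a b c
    simp only [List.foldl_cons, List.map_cons, List.sum_cons]
    rw [ih]
    refine Prod.ext (by ring) (Prod.ext (by ring) (by ring))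

lemma pv_sum_map_sub (K : List String) (f g : String → Int) :
    (K.map (fun k => f k - g k)).sum = (K.map f).sum - (K.map g).sum := by
  induction K with
  | nil => simp
  | cons k K ih => simp only [List.map_cons, List.sum_cons, ih]; ring

lemma pv_sum_ite_key (a : String) (x : Int) (f : String → Int) (hfa : f a = 0) :
    ∀ (K : List String), K.Nodup →
    (K.map (fun k => if (a == k) = true then x else f k)).sum
      = (if a ∈ K then x else 0) + (K.map f).sum := by
  intro K
  induction K with
  | nil => simp
  | cons h t ih =>
    intro hnd
    have hndt := (List.nodup_cons.mp hnd).2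
    have hhn := (List.nodup_cons.mp hnd).1
    by_cases hah : a = h
    · subst hah
      have hmapt : t.map (fun k => if (a == k) = true then x else f k) = t.map f := by
        apply List.map_congr_left
        intro k hk
        have : a ≠ k := fun he => hhn (he ▸ hk)
        simp [this]
      rw [List.map_cons, List.sum_cons, hmapt, List.map_cons, List.sum_cons]
      simp [hfa]
    · have hne : (a == h) = false := by simp [hah]
      simp only [List.map_cons, List.sum_cons, hne,
        ih hndt, List.mem_cons]
      by_cases hat : a ∈ t <;> simp [hat, hah] <;> try ring

lemma pv_getD_not_mem (m : List (String × List String)) (k : String)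
    (hk : k ∉ m.map (·.1)) : (PySem.Dict.mk m).getD k [] = [] := by
  apply PySem.Dict.getD_of_not_contains
  rw [PySem.Dict.contains_mk]
  apply List.any_eq_false.mpr
  intro p hp he
  exact hk (List.mem_map.mpr ⟨p, hp, by simpa using he⟩)

-- master lemma: a sum of per-key contributions over any duplicate-free key list K covering m's
-- keys collapses to a sum over m's items, provided absent keys contribute nothing.
lemma pv_sum_getD (H : String → List String → Int) (hH : ∀ k, H k [] = 0) :
    ∀ (m : List (String × List String)) (K : List String), K.Nodup → (m.map (·.1)).Nodup →
    (∀ k ∈ m.map (·.1), k ∈ K) →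
    (K.map (fun k => H k ((PySem.Dict.mk m).getD k []))).sum
      = (m.map (fun kv => H kv.1 kv.2)).sum := by
  intro m
  induction m with
  | nil =>
    intro K hK _ _
    have : K.map (fun k => H k ((PySem.Dict.mk ([] : List (String × List String))).getD k [])) = K.map (fun k => (0 : Int)) := by
      apply List.map_congr_left
      intro k _
      have : (PySem.Dict.mk ([] : List (String × List String))).getD k [] = [] := by
        apply PySem.Dict.getD_of_not_contains
        rw [PySem.Dict.contains_mk]; simp
      rw [this, hH]
    simp [this]
  | cons kv rest ih =>
    intro K hK hnd hcov
    have hndr : (rest.map (·.1)).Nodup := (List.nodup_cons.mp hnd).2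
    have hkvnr : kv.1 ∉ rest.map (·.1) := (List.nodup_cons.mp hnd).1
    have hstep : K.map (fun k => H k ((PySem.Dict.mk (kv :: rest)).getD k []))
        = K.map (fun k => if (kv.1 == k) = true then H kv.1 kv.2
            else H k ((PySem.Dict.mk rest).getD k [])) := by
      apply List.map_congr_left
      intro k _
      rw [PySem.Dict.getD_eq_get?_getD]
      rw [show (PySem.Dict.mk (kv :: rest)) = PySem.Dict.mk ((kv.1, kv.2) :: rest) by rfl]
      rw [PySem.Dict.get?_mk_cons]
      by_cases h : (kv.1 == k) = true
      · have : kv.1 = k := by simpa using h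
        simp [← this]
      · simp [h, PySem.Dict.getD_eq_get?_getD]
    rw [hstep]
    rw [pv_sum_ite_key kv.1 (H kv.1 kv.2) _ (by rw [pv_getD_not_mem rest kv.1 hkvnr, hH]) K hK]
    have hkvK : kv.1 ∈ K := hcov kv.1 (by simp)
    rw [if_pos hkvK]
    rw [ih K hK hndr (fun k hk => hcov k (by simp [hk]))]
    simp

-- ---- B-side lemmas: the triple list ----

lemma pv_key_mem (m : List (String × List String)) (t : String × Int × String)
    (ht : t ∈ pvTriples m) : t.1 ∈ m.map (·.1) := by
  unfold pvTriples at ht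
  rcases List.mem_flatMap.mp ht with ⟨kv, hkv, hmem⟩
  rcases List.mem_map.mp hmem with ⟨iv, _, hiv⟩
  exact List.mem_map.mpr ⟨kv, hkv, by rw [← hiv]⟩

lemma pv_nodup_block (k : String) (vs : List String) :
    ((PySem.List.enumerate vs 0).map (fun iv => (k, iv.1, iv.2))).Nodup := by
  have hpair := PySem.List.pairwise_lt_enumerate vs 0
  have hnd : (PySem.List.enumerate vs 0).Nodup :=
    hpair.imp (fun {a b} h => fun he => by rw [he] at h; exact lt_irrefl _ h)
  apply hnd.map
  intro a b hab
  have h1 : a.1 = b.1 := congrArg (fun t : String × Int × String => t.2.1) hab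
  have h2 : a.2 = b.2 := congrArg (fun t : String × Int × String => t.2.2) hab
  exact Prod.ext h1 h2

lemma pv_nodup_triples : ∀ (m : List (String × List String)), (m.map (·.1)).Nodup →
    (pvTriples m).Nodup := by
  intro m
  induction m with
  | nil => intro _; simp [pvTriples]
  | cons kv rest ih =>
    intro hnd
    have hndr := (List.nodup_cons.mp hnd).2
    have hkvnr := (List.nodup_cons.mp hnd).1
    unfold pvTriples
    rw [List.flatMap_cons, List.nodup_append]
    refine ⟨pv_nodup_block kv.1 kv.2, ih hndr, ?_⟩
    intro a ha b hb hab
    rcases List.mem_map.mp ha with ⟨iv, _, hiv⟩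
    have hb1 : b.1 ∈ rest.map (·.1) := pv_key_mem rest b hb
    rw [← hab, ← hiv] at hb1
    exact hkvnr hb1

-- membership in the triple set of a duplicate-free map is lookup + enumerate membership
lemma pv_mem_triples : ∀ (m : List (String × List String)), (m.map (·.1)).Nodup →
    ∀ (k : String) (i : Int) (v : String),
    ((k, i, v) ∈ pvTriples m ↔ (i, v) ∈ PySem.List.enumerate ((PySem.Dict.mk m).getD k []) 0) := by
  intro m
  induction m with
  | nil =>
    intro _ k i v
    have hd : (PySem.Dict.mk ([] : List (String × List String))).getD k [] = [] := by
      apply PySem.Dict.getD_of_not_contains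
      rw [PySem.Dict.contains_mk]; simp
    simp [pvTriples, hd, PySem.List.enumerate]
  | cons kv rest ih =>
    intro hnd k i v
    have hndr := (List.nodup_cons.mp hnd).2
    have hkvnr := (List.nodup_cons.mp hnd).1
    have hsplit : pvTriples (kv :: rest)
        = (PySem.List.enumerate kv.2 0).map (fun iv => (kv.1, iv.1, iv.2)) ++ pvTriples rest := by
      unfold pvTriples; rw [List.flatMap_cons]
    rw [hsplit, List.mem_append]
    rw [PySem.Dict.getD_eq_get?_getD,
      show (PySem.Dict.mk (kv :: rest)) = PySem.Dict.mk ((kv.1, kv.2) :: rest) by rfl,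
      PySem.Dict.get?_mk_cons]
    by_cases hk : kv.1 = k
    · subst hk
      simp only [beq_self_eq_true, if_pos, Option.getD_some]
      constructor
      · rintro (hb | hr)
        · rcases List.mem_map.mp hb with ⟨iv, hiv, he⟩
          have h1 : iv.1 = i := congrArg (fun t : String × Int × String => t.2.1) he
          have h2 : iv.2 = v := congrArg (fun t : String × Int × String => t.2.2) he
          rwa [show (i, v) = iv from (Prod.ext h1 h2).symm]
        · exact absurd (pv_key_mem rest _ hr) hkvnr
      · intro hmem
        exact Or.inl (List.mem_map.mpr ⟨(i, v), hmem, rfl⟩)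
    · have hne : (kv.1 == k) = false := by simp [hk]
      rw [hne]
      simp only [Bool.false_eq_true, if_false]
      rw [← PySem.Dict.getD_eq_get?_getD]
      constructor
      · rintro (hb | hr)
        · rcases List.mem_map.mp hb with ⟨iv, _, he⟩
          exact absurd (congrArg (fun t : String × Int × String => t.1) he) hk
        · exact (ih hndr k i v).mp hr
      · intro hmem
        exact Or.inr ((ih hndr k i v).mpr hmem)

-- shrinking the index range to min: the bound test folds into the range
lemma pv_range_min (m : Nat) (q : Nat → Bool) : ∀ (n : Nat),
    ((List.range n).filter (fun j => decide (j < m) && q j)).length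
      = ((List.range (min n m)).filter q).length := by
  intro n
  induction n with
  | zero => simp
  | succ n ih =>
    rw [List.range_succ, List.filter_append, List.length_append, ih]
    by_cases h : n < m
    · have hmin2 : min n m = n := by omega
      rw [hmin2, show min (n + 1) m = n + 1 from by omega, List.range_succ,
        List.filter_append, List.length_append]
      simp [List.filter_cons, h]
    · rw [show min (n + 1) m = min n m from by omega]
      simp [h]

-- the per-key filtered-enumerate count is pvCnt
lemma pv_enum_cnt (g p : List String) :
    ((PySem.List.enumerate g 0).filter
      (fun iv => decide ((iv.1, iv.2) ∈ PySem.List.enumerate p 0))).length = pvCnt g p := by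
  rw [show PySem.List.enumerate g 0 = PySem.List.enumerate g by rfl,
    PySem.List.enumerate_eq_map_pyRange g "",
    show PySem.List.len g = ((g.length : Nat) : Int) by rfl,
    PySem.List.pyRange_zero_nat, List.map_map, List.filter_map, List.length_map]
  have hpred : ∀ j : Nat,
      ((fun iv : Int × String => decide ((iv.1, iv.2) ∈ PySem.List.enumerate p 0)) ∘
        ((fun j : Int => (j, PySem.List.pyGetD g j "")) ∘ (fun k : Nat => (k : Int)))) j
      = (decide (j < p.length) && decide (g.getD j "" = p.getD j "")) := by
    intro j
    have hg : PySem.List.pyGetD g ((j : Nat) : Int) "" = g.getD j "" := by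
      simp [PySem.List.pyGetD_natCast]
    simp only [Function.comp, hg]
    rw [← Bool.decide_and, decide_eq_decide]
    constructor
    · intro hmem
      rcases (PySem.List.mem_enumerate_iff p 0 _).mp hmem with ⟨kk, hkk, he⟩
      have h1 : ((j : Int)) = 0 + (kk : Int) := congrArg Prod.fst he
      have hjk : j = kk := by omega
      subst hjk
      have h2 : g.getD j "" = p[j] := congrArg Prod.snd he
      exact ⟨hkk, by rw [h2, List.getD_eq_getElem p "" hkk]⟩
    · rintro ⟨hlt, heq⟩
      refine (PySem.List.mem_enumerate_iff p 0 _).mpr ⟨j, hlt, ?_⟩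
      rw [heq]
      have : p.getD j "" = p[j] := List.getD_eq_getElem p "" hlt
      rw [this]
      refine Prod.ext (by omega) rfl
  rw [List.filter_congr (fun j _ => hpred j), pv_range_min p.length _ g.length]
  rfl

-- tp: the intersection count over the flattened gt triples is the per-item sum of pvCnt
lemma pv_tp (pred_map : List (String × List String)) (hp : (pred_map.map (·.1)).Nodup) :
    ∀ (m : List (String × List String)),
    (((pvTriples m).filter (fun t => PySem.Set.contains (pvTriples pred_map) t)).length : Int)
      = (m.map (fun kv => (pvCnt kv.2 ((PySem.Dict.mk pred_map).getD kv.1 []) : Int))).sum := by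
  have hcont : ∀ t : String × Int × String,
      PySem.Set.contains (pvTriples pred_map) t = decide (t ∈ pvTriples pred_map) := by
    intro t
    by_cases ht : t ∈ pvTriples pred_map
    · simp [ht, (PySem.Set.contains_iff _ _).mpr ht]
    · cases hc : PySem.Set.contains (pvTriples pred_map) t with
      | false => simp [ht]
      | true => exact absurd ((PySem.Set.contains_iff _ _).mp hc) ht
  intro m
  induction m with
  | nil => simp [pvTriples]
  | cons kv rest ih =>
    have hsplit : pvTriples (kv :: rest)
        = (PySem.List.enumerate kv.2 0).map (fun iv => (kv.1, iv.1, iv.2)) ++ pvTriples rest := by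
      unfold pvTriples; rw [List.flatMap_cons]
    rw [hsplit, List.filter_append, List.length_append, List.map_cons, List.sum_cons, ← ih]
    push_cast
    congr 1
    -- the block's contribution
    rw [List.filter_map, List.length_map]
    have hpred : ∀ iv ∈ PySem.List.enumerate kv.2 0,
        ((fun t => PySem.Set.contains (pvTriples pred_map) t) ∘ (fun iv : Int × String => (kv.1, iv.1, iv.2))) iv
        = decide ((iv.1, iv.2) ∈ PySem.List.enumerate ((PySem.Dict.mk pred_map).getD kv.1 []) 0) := by
      intro iv _
      simp only [Function.comp, hcont]
      rw [decide_eq_decide]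
      exact pv_mem_triples pred_map hp kv.1 iv.1 iv.2
    rw [List.filter_congr hpred]
    exact_mod_cast congrArg (fun n : Nat => (n : Int)) (pv_enum_cnt kv.2 _)

-- total length of the flattened triples
lemma pv_len_triples : ∀ (m : List (String × List String)),
    ((pvTriples m).length : Int) = (m.map (fun kv => (kv.2.length : Int))).sum := by
  intro m
  induction m with
  | nil => simp [pvTriples]
  | cons kv rest ih =>
    have hsplit : pvTriples (kv :: rest)
        = (PySem.List.enumerate kv.2 0).map (fun iv => (kv.1, iv.1, iv.2)) ++ pvTriples rest := by
      unfold pvTriples; rw [List.flatMap_cons]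
    rw [hsplit, List.length_append, List.map_cons, List.sum_cons, ← ih]
    push_cast
    simp [PySem.List.length_enumerate]

theorem score_ordered_maps_py_spec : Claim_equal_score_ordered_maps_py := by
  intro gt_map pred_map _ hpre
  obtain ⟨hg, hp⟩ := hpre
  unfold Spec_score_ordered_maps_py score_ordered_maps_py score_ordered_maps_py_alt
  simp only []
  -- the key list of A's loop
  set K : List String :=
    PySem.Set.union (PySem.Set.ofList (gt_map.map (·.1))) (pred_map.map (·.1)) with hKdef
  have hKnd : K.Nodup := PySem.Set.nodup_union _ _ (PySem.Set.nodup_ofList _)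
  have hKmem : ∀ y, y ∈ K ↔ y ∈ gt_map.map (·.1) ∨ y ∈ pred_map.map (·.1) := by
    intro y
    rw [hKdef, PySem.Set.mem_union, PySem.Set.mem_ofList]
  -- per-key functions
  set eqf : String → Int := fun k =>
    (pvCnt ((PySem.Dict.mk gt_map).getD k []) ((PySem.Dict.mk pred_map).getD k []) : Int) with heqf
  set lenP : String → Int := fun k => (((PySem.Dict.mk pred_map).getD k []).length : Int) with hlenP
  set lenG : String → Int := fun k => (((PySem.Dict.mk gt_map).getD k []).length : Int) with hlenG
  -- rewrite A's fold into the triple of sums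
  have hfold : K.foldl (fun acc k =>
      let g := (PySem.Dict.mk gt_map).getD k []
      let p := (PySem.Dict.mk pred_map).getD k []
      let n : Int := min (g.length : Int) (p.length : Int)
      let eq : Int := ((PySem.List.pyRange 0 n 1).map (fun i =>
        if PySem.List.pyGetD g i "" = PySem.List.pyGetD p i "" then (1 : Int) else 0)).sum
      (acc.1 + eq, acc.2.1 + ((p.length : Int) - eq), acc.2.2 + ((g.length : Int) - eq)))
      ((0 : Int), (0 : Int), (0 : Int))
      = ((K.map eqf).sum, (K.map (fun k => lenP k - eqf k)).sum,
         (K.map (fun k => lenG k - eqf k)).sum) := by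
    have hstepeq : (fun (acc : Int × Int × Int) (k : String) =>
        let g := (PySem.Dict.mk gt_map).getD k []
        let p := (PySem.Dict.mk pred_map).getD k []
        let n : Int := min (g.length : Int) (p.length : Int)
        let eq : Int := ((PySem.List.pyRange 0 n 1).map (fun i =>
          if PySem.List.pyGetD g i "" = PySem.List.pyGetD p i "" then (1 : Int) else 0)).sum
        (acc.1 + eq, acc.2.1 + ((p.length : Int) - eq), acc.2.2 + ((g.length : Int) - eq)))
        = (fun (acc : Int × Int × Int) (k : String) =>
          (acc.1 + eqf k, acc.2.1 + (lenP k - eqf k), acc.2.2 + (lenG k - eqf k))) := by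
      funext acc k
      have hinner := pv_inner ((PySem.Dict.mk gt_map).getD k []) ((PySem.Dict.mk pred_map).getD k [])
      simp only [heqf] at *
      simp only [hinner, hlenP, hlenG]
    rw [hstepeq, pv_foldl_triple K eqf (fun k => lenP k - eqf k) (fun k => lenG k - eqf k) 0 0 0]
    simp
  rw [hfold]
  -- collapse the three sums over K to per-item sums
  have hcovG : ∀ k ∈ gt_map.map (·.1), k ∈ K := fun k hk => (hKmem k).mpr (Or.inl hk)
  have hcovP : ∀ k ∈ pred_map.map (·.1), k ∈ K := fun k hk => (hKmem k).mpr (Or.inr hk)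
  have htp : (K.map eqf).sum
      = (gt_map.map (fun kv => (pvCnt kv.2 ((PySem.Dict.mk pred_map).getD kv.1 []) : Int))).sum := by
    have := pv_sum_getD
      (fun k v => (pvCnt v ((PySem.Dict.mk pred_map).getD k []) : Int))
      (by intro k; simp [pvCnt]) gt_map K hKnd hg hcovG
    simpa [heqf] using this
  have htotP : (K.map lenP).sum = (pred_map.map (fun kv => (kv.2.length : Int))).sum := by
    have := pv_sum_getD (fun _ v => (v.length : Int)) (by intro k; simp)
      pred_map K hKnd hp hcovP
    simpa [hlenP] using this
  have htotG : (K.map lenG).sum = (gt_map.map (fun kv => (kv.2.length : Int))).sum := by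
    have := pv_sum_getD (fun _ v => (v.length : Int)) (by intro k; simp)
      gt_map K hKnd hg hcovG
    simpa [hlenG] using this
  -- B's pieces
  have hGid : PySem.Set.ofList (pvTriples gt_map) = pvTriples gt_map :=
    PySem.Set.ofList_eq_self_of_nodup _ (pv_nodup_triples gt_map hg)
  have hPid : PySem.Set.ofList (pvTriples pred_map) = pvTriples pred_map :=
    PySem.Set.ofList_eq_self_of_nodup _ (pv_nodup_triples pred_map hp)
  rw [hGid, hPid]
  have hinterlen : ((PySem.Set.inter (pvTriples gt_map) (pvTriples pred_map)).length : Int)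
      = (gt_map.map (fun kv => (pvCnt kv.2 ((PySem.Dict.mk pred_map).getD kv.1 []) : Int))).sum := by
    have := pv_tp pred_map hp gt_map
    simpa [PySem.Set.inter] using this
  refine Prod.ext ?_ (Prod.ext ?_ ?_)
  · simp only [htp, hinterlen]
  · simp only [pv_sum_map_sub K lenP eqf, htotP, htp, hinterlen, pv_len_triples pred_map]
  · simp only [pv_sum_map_sub K lenG eqf, htotG, htp, hinterlen, pv_len_triples gt_map]
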